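-- pv_equiv track=rewrite | github.com/Goldstr1ker/matrix | my_matrix.py | step_matrix
-- ===== SOURCE A (Python) =====
-- def step_matrix(step: int, columns: int)-> list:
--     """Функция для создания матрицы с шагом и числом строк step и числом колонок columns
--
--     Args:
--         step (int): шаг каждого элемента матрицы(начало с 1) и число колонок
--         columns (int): число колонок в матрице
--
--     Returns:
--         list: матрица, в виде вложенных списков
--     """
--     matrix = []
--     for i in range(1, step+1):
--         row = []
--         counter = 0
--         for j in range(columns):
--             num = i*counter
--             row.append(num)
--             counter+=1
--         matrix.append(row)
--     return matrix
-- ===== SOURCE B (Python) =====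
-- def step_matrix(step: int, columns: int) -> list:
--     """Row i of the result is i times the base row [0, 1, ..., columns-1].
--     Build the base row once, then derive each next row from the previous one
--     by elementwise addition of the base row (no multiplication)."""
--     if step <= 0:
--         return []
--     base = list(range(columns))
--     rows = [base]
--     prev = base
--     for _ in range(step - 1):
--         prev = [p + b for p, b in zip(prev, base)]
--         rows.append(prev)
--     return rows
-- ===== Notes on version B (the rewrite author's own statement) =====
-- stated objective: alternative
-- what changed: B builds the base row [0..columns-1] once and derives each successive row from the previous one by elementwise addition (prefix-sum of rows) instead of recomputing every entry as i*counter in a per-row counter loop.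
import Mathlib
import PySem

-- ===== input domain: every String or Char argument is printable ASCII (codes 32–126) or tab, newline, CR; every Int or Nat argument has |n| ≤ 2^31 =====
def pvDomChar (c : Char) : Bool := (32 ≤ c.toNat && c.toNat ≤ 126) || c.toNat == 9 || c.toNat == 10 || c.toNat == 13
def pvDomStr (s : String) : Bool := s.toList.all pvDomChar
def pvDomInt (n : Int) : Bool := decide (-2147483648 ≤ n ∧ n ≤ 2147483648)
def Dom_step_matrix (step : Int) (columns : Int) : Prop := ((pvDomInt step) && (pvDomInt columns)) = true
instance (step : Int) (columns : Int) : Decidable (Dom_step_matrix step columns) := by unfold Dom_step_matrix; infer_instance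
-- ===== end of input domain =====

-- B builds the base row once and derives each row from the previous one by elementwise
-- addition instead of an i*counter loop (objective: alternative decomposition, same cost).


-- ===== PORT A =====
def step_matrix (step : Int) (columns : Int) : List (List Int) :=
  (PySem.List.pyRange 1 (step + 1) 1).foldl
    (fun matrix i =>
      let rc := (PySem.List.pyRange 0 columns 1).foldl
        (fun (st : List Int × Int) _j => (st.1 ++ [i * st.2], st.2 + 1)) ([], 0)
      matrix ++ [rc.1]) []

-- ===== PORT B =====
def step_matrix_alt (step : Int) (columns : Int) : List (List Int) :=
  if step ≤ 0 then []
  else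
    let base := PySem.List.pyRange 0 columns 1
    let st := (PySem.List.pyRange 0 (step - 1) 1).foldl
      (fun (st : List Int × List (List Int)) _ =>
        let next := (st.1.zip base).map (fun p => p.1 + p.2)
        (next, st.2 ++ [next])) (base, [base])
    st.2

-- ===== PRECONDITION & SPEC =====
def Spec_step_matrix (step : Int) (columns : Int) (out : List (List Int)) : Prop := out = step_matrix_alt step columns
instance (step : Int) (columns : Int) (out : List (List Int)) : Decidable (Spec_step_matrix step columns out) := by unfold Spec_step_matrix; infer_instance

-- ===== CLAIM (what is proved, stated in full; the proofs are below) =====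
def Claim_equal_step_matrix : Prop := ∀ (step : Int) (columns : Int), Dom_step_matrix step columns → Spec_step_matrix step columns (step_matrix step columns)

-- ===== LEMMAS AND PROOFS =====

-- the multiple-of-the-base row
def pvRow (columns : Int) (m : Int) : List Int :=
  (PySem.List.pyRange 0 columns 1).map (fun x => m * x)

-- A's inner loop: appending i*counter while counting produces row ++ map
theorem pvInnerA (i : Int) (l : List Int) (row : List Int) (c : Int) :
    (l.foldl (fun (st : List Int × Int) _j => (st.1 ++ [i * st.2], st.2 + 1)) (row, c)).1
      = row ++ (List.range l.length).map (fun (k : Nat) => i * (c + (k : Int))) := by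
  induction l generalizing row c with
  | nil => simp
  | cons x xs ih =>
      simp only [List.foldl_cons]
      rw [ih]
      rw [List.length_cons, List.range_succ_eq_map, List.map_cons, List.map_map]
      simp only [Nat.cast_zero, add_zero, List.append_assoc, List.singleton_append]
      congr 2
      apply List.map_congr_left
      intro k _
      simp only [Function.comp_apply]
      push_cast
      ring

-- A's row for row-index i is pvRow columns i
theorem pvRowA (i : Int) (columns : Int) :
    ((PySem.List.pyRange 0 columns 1).foldl
        (fun (st : List Int × Int) _j => (st.1 ++ [i * st.2], st.2 + 1)) ([], 0)).1
      = pvRow columns i := by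
  rw [pvInnerA]
  unfold pvRow
  rw [PySem.List.pyRange_one, List.map_map, List.length_map, List.length_range]
  simp only [List.nil_append]
  apply List.map_congr_left
  intro k _
  simp

-- A is the map of pvRow over range(1, step+1)
theorem pvA_eq (step columns : Int) :
    step_matrix step columns = (PySem.List.pyRange 1 (step + 1) 1).map (pvRow columns) := by
  unfold step_matrix
  rw [PySem.List.foldl_congr_mem _ _ (fun matrix i => matrix ++ [pvRow columns i]) []
        (by intro acc i _; simp only []; rw [pvRowA])]
  rw [PySem.List.foldl_append_singleton_eq_map]
  simp

-- elementwise addition of the base row advances the multiple by one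
theorem pvZipAdd (columns : Int) (m : Int) :
    ((pvRow columns m).zip (PySem.List.pyRange 0 columns 1)).map (fun p => p.1 + p.2)
      = pvRow columns (m + 1) := by
  unfold pvRow
  generalize PySem.List.pyRange 0 columns 1 = l
  induction l with
  | nil => simp
  | cons x xs ih => simp [ih]; ring

-- B's base row is pvRow columns 1
theorem pvBase (columns : Int) :
    PySem.List.pyRange 0 columns 1 = pvRow columns 1 := by
  simp [pvRow]

-- invariant of B's loop: after t iterations prev = pvRow (t+1), rows = map pvRow over 1..t+1
theorem pvB_loop (columns : Int) (t : Int) (ht : 0 ≤ t) :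
    (PySem.List.pyRange 0 t 1).foldl
        (fun (st : List Int × List (List Int)) _ =>
          ((st.1.zip (PySem.List.pyRange 0 columns 1)).map (fun p => p.1 + p.2),
           st.2 ++ [(st.1.zip (PySem.List.pyRange 0 columns 1)).map (fun p => p.1 + p.2)]))
        (PySem.List.pyRange 0 columns 1, [PySem.List.pyRange 0 columns 1])
      = (pvRow columns (t + 1), (PySem.List.pyRange 1 (t + 2) 1).map (pvRow columns)) := by
  obtain ⟨n, rfl⟩ := Int.eq_ofNat_of_zero_le ht
  induction n with
  | zero =>
      norm_num
      rw [show PySem.List.pyRange 1 2 1 = [1] from PySem.List.pyRange_one_singleton 1]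
      simp [pvBase]
  | succ n ih =>
      have h1 : ((n + 1 : Nat) : Int) = (n : Int) + 1 := by push_cast; ring
      rw [h1, PySem.List.pyRange_one_succ_right (by positivity), List.foldl_append, ih (by positivity)]
      simp only [List.foldl_cons, List.foldl_nil, pvZipAdd]
      rw [show (n : Int) + 1 + 2 = ((n : Int) + 2) + 1 by ring,
          PySem.List.pyRange_one_succ_right (by omega)]
      rw [List.map_append, show (n : Int) + 1 + 1 = (n : Int) + 2 by ring]
      norm_num

-- ===== VERDICT (by name: the statement is the Claim_ definition above) =====
theorem step_matrix_spec : Claim_equal_step_matrix := by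
  intro step columns _
  unfold Spec_step_matrix
  rw [pvA_eq]
  unfold step_matrix_alt
  by_cases h : step ≤ 0
  · rw [if_pos h, PySem.List.pyRange_one_eq_nil (by omega)]
    simp
  · rw [if_neg h]
    simp only []
    rw [pvB_loop columns (step - 1) (by omega)]
    rw [show step - 1 + 2 = step + 1 by ring]
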